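-- pv_equiv track=rewrite | github.com/NiaTheGreat/activewear-agent | src/tools/evaluator.py | _materials_related
-- ===== SOURCE A (Python) =====
-- from typing import Any, Dict, List, Optional
--
-- MATERIAL_FAMILIES = {
--     "polyester": [
--         "recycled polyester", "rpet", "repreve", "polyester", "pet", "recycled pet",
--     ],
--     "cotton": [
--         "organic cotton", "cotton", "bci cotton", "pima cotton", "supima cotton",
--     ],
--     "nylon": [
--         "nylon", "recycled nylon", "econyl", "polyamide", "nylon 6", "nylon 66",
--     ],
--     "spandex": ["spandex", "elastane", "lycra"],
--     "bamboo": ["bamboo", "bamboo viscose", "bamboo lyocell", "bamboo fiber"],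
--     "tencel": ["tencel", "lyocell", "modal"],
--     "merino": ["merino wool", "merino", "wool", "fine merino"],
--     "silk": ["silk", "mulberry silk"],
-- }
--
-- def _materials_related(target: str, mfr_materials: List[str]) -> bool:
--     """Check if *target* is in the same material family as any manufacturer material."""
--     for members in MATERIAL_FAMILIES.values():
--         target_in = any(m in target or target in m for m in members)
--         if target_in:
--             for mfr_mat in mfr_materials:
--                 if any(m in mfr_mat or mfr_mat in m for m in members):
--                     return True
--     return False
-- ===== SOURCE B (Python) =====
-- from typing import Any, Dict, List, Optional
--
-- MATERIAL_FAMILIES = {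
--     "polyester": [
--         "recycled polyester", "rpet", "repreve", "polyester", "pet", "recycled pet",
--     ],
--     "cotton": [
--         "organic cotton", "cotton", "bci cotton", "pima cotton", "supima cotton",
--     ],
--     "nylon": [
--         "nylon", "recycled nylon", "econyl", "polyamide", "nylon 6", "nylon 66",
--     ],
--     "spandex": ["spandex", "elastane", "lycra"],
--     "bamboo": ["bamboo", "bamboo viscose", "bamboo lyocell", "bamboo fiber"],
--     "tencel": ["tencel", "lyocell", "modal"],
--     "merino": ["merino wool", "merino", "wool", "fine merino"],
--     "silk": ["silk", "mulberry silk"],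
-- }
--
-- def _family_mask(s: str) -> int:
--     """Bitmask fingerprint: bit i is set iff s relates to the i-th material family."""
--     mask = 0
--     bit = 1
--     for members in MATERIAL_FAMILIES.values():
--         if any(m in s or s in m for m in members):
--             mask |= bit
--         bit <<= 1
--     return mask
--
-- def _materials_related(target: str, mfr_materials: List[str]) -> bool:
--     """Related iff the family fingerprints intersect (non-zero bitwise AND)."""
--     tmask = _family_mask(target)
--     return any(_family_mask(x) & tmask for x in mfr_materials)
-- ===== Notes on version B (the rewrite author's own statement) =====
-- stated objective: alternative
-- what changed: B reduces the problem to bitmask arithmetic: it computes for each string an integer family-fingerprint (bit i set iff the string relates to family i) and reports relatedness as a non-zero bitwise AND of the target's and a manufacturer material's fingerprints, instead of A's family-outer loop with a nested manufacturer scan and early return.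
import Mathlib
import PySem

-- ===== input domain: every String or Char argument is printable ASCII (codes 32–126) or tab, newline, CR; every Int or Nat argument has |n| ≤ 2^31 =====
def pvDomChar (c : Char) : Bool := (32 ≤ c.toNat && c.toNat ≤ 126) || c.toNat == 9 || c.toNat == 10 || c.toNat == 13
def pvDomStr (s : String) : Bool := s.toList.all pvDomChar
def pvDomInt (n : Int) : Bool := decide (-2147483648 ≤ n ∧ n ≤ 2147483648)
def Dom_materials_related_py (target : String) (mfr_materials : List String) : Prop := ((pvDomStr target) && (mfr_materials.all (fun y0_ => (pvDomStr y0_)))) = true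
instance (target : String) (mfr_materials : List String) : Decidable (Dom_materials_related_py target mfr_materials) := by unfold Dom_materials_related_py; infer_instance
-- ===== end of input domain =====

-- B computes an integer family-fingerprint per string and tests relatedness by a bitwise AND; same result as A's nested scans ('alternative').

-- MATERIAL_FAMILIES.values() (keys never used by either program)
def pvFamilies : List (List String) :=
  [ ["recycled polyester", "rpet", "repreve", "polyester", "pet", "recycled pet"],
    ["organic cotton", "cotton", "bci cotton", "pima cotton", "supima cotton"],
    ["nylon", "recycled nylon", "econyl", "polyamide", "nylon 6", "nylon 66"],
    ["spandex", "elastane", "lycra"],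
    ["bamboo", "bamboo viscose", "bamboo lyocell", "bamboo fiber"],
    ["tencel", "lyocell", "modal"],
    ["merino wool", "merino", "wool", "fine merino"],
    ["silk", "mulberry silk"] ]

-- 'm in s or s in m' for one member m against a string s
def pvRel (m s : String) : Bool := PySem.Str.isIn m s || PySem.Str.isIn s m

-- ===== PORT A =====
-- outer loop over families: if target matches the family, inner loop over mfr_materials
-- (return True on the first matching mfr material, else fall through to the next family)
def pvLoopA (target : String) (mfr_materials : List String) : List (List String) → Bool
  | [] => false
  | members :: rest =>
    if members.any (fun m => pvRel m target) then
      if mfr_materials.any (fun mfr_mat => members.any (fun m => pvRel m mfr_mat)) then true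
      else pvLoopA target mfr_materials rest
    else pvLoopA target mfr_materials rest

def materials_related_py (target : String) (mfr_materials : List String) : Bool :=
  pvLoopA target mfr_materials pvFamilies

-- ===== PORT B =====
-- _family_mask: fold over the families with (mask, bit) state, bit doubling each step
def pvFamilyMask (s : String) : Nat :=
  (pvFamilies.foldl
    (fun (st : Nat × Nat) members =>
      (if members.any (fun m => pvRel m s) then st.1 ||| st.2 else st.1, st.2 <<< 1))
    (0, 1)).1

def materials_related_py_alt (target : String) (mfr_materials : List String) : Bool :=
  let tmask := pvFamilyMask target
  mfr_materials.any (fun x => pvFamilyMask x &&& tmask != 0)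

-- ===== PRECONDITION & SPEC =====
def Spec_materials_related_py (target : String) (mfr_materials : List String) (out : Bool) : Prop := out = materials_related_py_alt target mfr_materials
instance (target : String) (mfr_materials : List String) (out : Bool) : Decidable (Spec_materials_related_py target mfr_materials out) := by unfold Spec_materials_related_py; infer_instance

-- ===== CLAIM (what is proved, stated in full; the proofs are below) =====
def Claim_equal_materials_related_py : Prop := ∀ (target : String) (mfr_materials : List String), Dom_materials_related_py target mfr_materials → Spec_materials_related_py target mfr_materials (materials_related_py target mfr_materials)

-- ===== LEMMAS AND PROOFS =====

-- family/string relatedness, propositionally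
def pvFam (members : List String) (s : String) : Prop := ∃ m ∈ members, pvRel m s = true

-- A's loop is true iff some family matches the target and some mfr material
theorem pvLoopA_eq (target : String) (mfr_materials : List String) :
    ∀ fams : List (List String),
      (pvLoopA target mfr_materials fams = true
        ↔ ∃ members ∈ fams, pvFam members target ∧ ∃ x ∈ mfr_materials, pvFam members x)
  | [] => by simp [pvLoopA]
  | members :: rest => by
    have ih := pvLoopA_eq target mfr_materials rest
    simp only [pvLoopA]
    split_ifs with h h2
    · constructor
      · intro _
        rcases List.any_eq_true.mp h2 with ⟨x, hx, hxm⟩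
        exact ⟨members, List.mem_cons_self,
          List.any_eq_true.mp h, x, hx, List.any_eq_true.mp hxm⟩
      · intro _; rfl
    · rw [ih]
      constructor
      · rintro ⟨ms, hm, ht, hx⟩; exact ⟨ms, List.mem_cons_of_mem _ hm, ht, hx⟩
      · rintro ⟨ms, hm, ht, x, hx, hxm⟩
        rcases List.mem_cons.mp hm with rfl | hm
        · exact absurd (List.any_eq_true.mpr ⟨x, hx, List.any_eq_true.mpr hxm⟩) h2
        · exact ⟨ms, hm, ht, x, hx, hxm⟩
    · rw [ih]
      constructor
      · rintro ⟨ms, hm, ht, hx⟩; exact ⟨ms, List.mem_cons_of_mem _ hm, ht, hx⟩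
      · rintro ⟨ms, hm, ht, hx⟩
        rcases List.mem_cons.mp hm with rfl | hm
        · exact absurd (List.any_eq_true.mpr ht) h
        · exact ⟨ms, hm, ht, hx⟩

-- characterisation of B's fold: which bits of the running mask are set
theorem pvMaskGo_testBit (s : String) :
    ∀ (fams : List (List String)) (acc k j : Nat),
      ((fams.foldl
          (fun (st : Nat × Nat) members =>
            (if members.any (fun m => pvRel m s) then st.1 ||| st.2 else st.1, st.2 <<< 1))
          (acc, 2 ^ k)).1.testBit j = true
        ↔ acc.testBit j = true
            ∨ ∃ i, ∃ h : i < fams.length, j = k + i ∧ pvFam fams[i] s)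
  | [], acc, k, j => by simp
  | members :: rest, acc, k, j => by
    have hshift : (2 ^ k) <<< 1 = 2 ^ (k + 1) := by
      rw [Nat.shiftLeft_eq]; ring
    simp only [List.foldl_cons, hshift]
    rw [pvMaskGo_testBit s rest _ (k + 1) j]
    by_cases h : members.any (fun m => pvRel m s) = true
    · simp only [h, if_true, Nat.testBit_or, Nat.testBit_two_pow, Bool.or_eq_true,
        decide_eq_true_eq]
      have hf : pvFam members s := by simpa [pvFam, List.any_eq_true] using h
      constructor
      · rintro ((ha | rfl) | ⟨i, hi, rfl, hm⟩)
        · exact Or.inl ha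
        · exact Or.inr ⟨0, by simp, by simp, hf⟩
        · exact Or.inr ⟨i + 1, by simpa using hi, by omega, by simpa using hm⟩
      · rintro (ha | ⟨i, hi, rfl, hm⟩)
        · exact Or.inl (Or.inl ha)
        · cases i with
          | zero => exact Or.inl (Or.inr (by omega))
          | succ i' => exact Or.inr ⟨i', by simpa using hi, by omega, by simpa using hm⟩
    · simp only [h]
      have hf : ¬ pvFam members s := by simpa [pvFam, List.any_eq_true] using h
      constructor
      · rintro (ha | ⟨i, hi, rfl, hm⟩)
        · exact Or.inl ha
        · exact Or.inr ⟨i + 1, by simpa using hi, by omega, by simpa using hm⟩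
      · rintro (ha | ⟨i, hi, rfl, hm⟩)
        · exact Or.inl ha
        · cases i with
          | zero => exact absurd (by simpa using hm) hf
          | succ i' => exact Or.inr ⟨i', by simpa using hi, by omega, by simpa using hm⟩

theorem pvFamilyMask_testBit (s : String) (j : Nat) :
    (pvFamilyMask s).testBit j = true
      ↔ ∃ h : j < pvFamilies.length, pvFam pvFamilies[j] s := by
  have := pvMaskGo_testBit s pvFamilies 0 0 j
  rw [pow_zero] at this
  unfold pvFamilyMask
  rw [this]
  simp only [Nat.zero_testBit, Bool.false_eq_true, false_or, Nat.zero_add]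
  constructor
  · rintro ⟨i, hi, rfl, hm⟩; exact ⟨hi, hm⟩
  · rintro ⟨hj, hm⟩; exact ⟨j, hj, rfl, hm⟩

theorem pvAnd_ne_zero (a b : Nat) : (a &&& b ≠ 0) ↔ ∃ j, a.testBit j = true ∧ b.testBit j = true := by
  constructor
  · intro h
    by_contra hc
    rw [not_exists] at hc
    refine h (Nat.zero_of_testBit_eq_false fun j => ?_)
    cases ha : a.testBit j <;> cases hb : b.testBit j <;> simp [Nat.testBit_and, ha, hb]
    exact absurd hb (by simpa [ha] using hc j)
  · rintro ⟨j, ha, hb⟩ h0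
    have := congrArg (fun n => Nat.testBit n j) h0
    simp [Nat.testBit_and, ha, hb] at this

-- ===== VERDICT (by name: the statement is the Claim_ definition above) =====
theorem materials_related_py_spec : Claim_equal_materials_related_py := by
  intro target mfr_materials _
  unfold Spec_materials_related_py materials_related_py materials_related_py_alt
  rw [Bool.eq_iff_iff, pvLoopA_eq]
  simp only [List.any_eq_true, bne_iff_ne, ne_eq]
  constructor
  · rintro ⟨members, hmem, ht, x, hx, hxm⟩
    rcases List.mem_iff_getElem.mp hmem with ⟨j, hj, rfl⟩
    refine ⟨x, hx, (pvAnd_ne_zero _ _).mpr ⟨j, ?_, ?_⟩⟩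
    · exact (pvFamilyMask_testBit x j).mpr ⟨hj, hxm⟩
    · exact (pvFamilyMask_testBit target j).mpr ⟨hj, ht⟩
  · rintro ⟨x, hx, hne⟩
    rcases (pvAnd_ne_zero _ _).mp hne with ⟨j, hxj, htj⟩
    rcases (pvFamilyMask_testBit x j).mp hxj with ⟨hj, hxm⟩
    rcases (pvFamilyMask_testBit target j).mp htj with ⟨_, htm⟩
    exact ⟨pvFamilies[j], List.mem_iff_getElem.mpr ⟨j, hj, rfl⟩, htm, x, hx, hxm⟩
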